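-- pv_equiv track=rewrite | github.com/NTUwanderer/ADLxMLDS2017 | hw1/test_cnn.py | myTrim
-- ===== SOURCE A (Python) =====
-- def myTrim(onehot_pred_index, threshold = 3):
--     trimmed_pred_index = []
--     sil = 7
--     current = 7
--
--     temp = 7
--     temp_count = 0
--     for index in onehot_pred_index:
--         if index == temp:
--             if temp == current:
--                 continue
--
--             temp_count += 1
--
--         else:
--             temp_count = 1
--             temp = index
--
--         if temp_count == threshold:
--             trimmed_pred_index.append(temp)
--             current = temp
--
--     if trimmed_pred_index[-1] == sil:
--         trimmed_pred_index.pop()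
--
--     return trimmed_pred_index
-- ===== SOURCE B (Python) =====
-- def myTrim(onehot_pred_index, threshold=3):
--     # Pass 1: run-length encode the sequence into (value, run_length) pairs.
--     runs = []
--     i = 0
--     n = len(onehot_pred_index)
--     while i < n:
--         j = i
--         while j < n and onehot_pred_index[j] == onehot_pred_index[i]:
--             j += 1
--         runs.append((onehot_pred_index[i], j - i))
--         i = j
--     # Pass 2: keep one copy of each long-enough run that differs from the
--     # last kept value (7 = silence is also the initial "last kept" value).
--     trimmed = []
--     current = 7
--     for v, length in runs:
--         if v != current and 1 <= threshold <= length: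
--             trimmed.append(v)
--             current = v
--     if trimmed[-1] == 7:
--         trimmed.pop()
--     return trimmed
-- ===== Notes on version B (the rewrite author's own statement) =====
-- stated objective: simpler
-- what changed: Replaces A's element-by-element state machine over four mutable variables (temp/temp_count/current/continue logic) by two plain passes: run-length encode the sequence, then keep one copy of each run whose value differs from the last kept value and whose length admits the threshold.
import Mathlib
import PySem

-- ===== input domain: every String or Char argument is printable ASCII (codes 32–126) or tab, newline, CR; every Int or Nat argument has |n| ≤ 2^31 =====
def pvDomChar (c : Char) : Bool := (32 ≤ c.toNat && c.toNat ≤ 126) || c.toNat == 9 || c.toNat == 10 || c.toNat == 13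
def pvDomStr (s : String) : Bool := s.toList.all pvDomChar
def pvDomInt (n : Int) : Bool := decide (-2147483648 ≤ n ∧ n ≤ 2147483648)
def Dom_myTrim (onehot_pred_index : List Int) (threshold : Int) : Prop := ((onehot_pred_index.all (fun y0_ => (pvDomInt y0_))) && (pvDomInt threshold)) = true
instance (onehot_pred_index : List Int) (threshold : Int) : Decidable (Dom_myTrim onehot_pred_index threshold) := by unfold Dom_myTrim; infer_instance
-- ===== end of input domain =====

-- B replaces A's four-variable element-by-element state machine by two passes —
-- run-length encode, then filter the runs — same values on all inputs where A returns (objective: simpler).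

-- ===== PORT A =====
-- one iteration of A's for-loop over state (trimmed_pred_index, current, temp, temp_count)
def stepA (threshold : Int) (s : List Int × Int × Int × Int) (index : Int) :
    List Int × Int × Int × Int :=
  match s with
  | (o, current, temp, temp_count) =>
    if index = temp ∧ temp = current then (o, current, temp, temp_count)  -- 'continue'
    else
      let temp' := if index = temp then temp else index
      let temp_count' := if index = temp then temp_count + 1 else 1
      if temp_count' = threshold then (o ++ [temp'], temp', temp', temp_count')
      else (o, current, temp', temp_count')

def myTrim (onehot_pred_index : List Int) (threshold : Int) : List Int :=
  let s := onehot_pred_index.foldl (stepA threshold) ([], 7, 7, 0)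
  let o := s.1
  -- Python's final negative-index access raises IndexError when the list is empty; outside Pre_myTrim
  match o.getLast? with
  | some v => if v = 7 then o.dropLast else o
  | none => o

-- ===== PORT B =====
-- pass 1 of Source B: forward run-length encoding (the inner while-loop that extends run v, count n)
def rleGo (v : Int) (n : Int) : List Int → List (Int × Int)
  | [] => [(v, n)]
  | y :: ys => if y = v then rleGo v (n + 1) ys else (v, n) :: rleGo y 1 ys

def rle : List Int → List (Int × Int)
  | [] => []
  | x :: xs => rleGo x 1 xs

-- pass 2 of Source B: keep a run iff its value differs from `current` and threshold ∈ [1, length]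
def stepB (threshold : Int) (s : List Int × Int) (r : Int × Int) : List Int × Int :=
  if r.1 ≠ s.2 ∧ 1 ≤ threshold ∧ threshold ≤ r.2 then (s.1 ++ [r.1], r.1) else s

def myTrim_alt (onehot_pred_index : List Int) (threshold : Int) : List Int :=
  let s := (rle onehot_pred_index).foldl (stepB threshold) ([], 7)
  let o := s.1
  -- Source B's final negative-index access raises IndexError when the list is empty; outside Pre_myTrim
  match o.getLast? with
  | some v => if v = 7 then o.dropLast else o
  | none => o

-- ===== PRECONDITION & SPEC =====
-- Pre_ excludes exactly the inputs on which A (and B) raise IndexError at the final last-element access, i.e. where no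
-- run survives: for threshold = 1 this needs some non-7 element, for threshold ≥ 2 a window of
-- `threshold` equal non-7 elements, and for threshold ≤ 0 the result is always empty.
def Pre_myTrim (onehot_pred_index : List Int) (threshold : Int) : Prop :=
  (threshold = 1 ∧ ∃ x ∈ onehot_pred_index, x ≠ 7) ∨
  (2 ≤ threshold ∧ ∃ i ∈ List.range onehot_pred_index.length,
    i + threshold.toNat ≤ onehot_pred_index.length ∧
    onehot_pred_index.getD i 0 ≠ 7 ∧
    ∀ j ∈ List.range threshold.toNat,
      onehot_pred_index.getD (i + j) 0 = onehot_pred_index.getD i 0)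
instance (onehot_pred_index : List Int) (threshold : Int) : Decidable (Pre_myTrim onehot_pred_index threshold) := by unfold Pre_myTrim; infer_instance
def pvWitness_myTrim : List Int × Int := ([1, 1, 1], 3)

def Spec_myTrim (onehot_pred_index : List Int) (threshold : Int) (out : List Int) : Prop := out = myTrim_alt onehot_pred_index threshold
instance (onehot_pred_index : List Int) (threshold : Int) (out : List Int) : Decidable (Spec_myTrim onehot_pred_index threshold out) := by unfold Spec_myTrim; infer_instance

-- ===== CLAIM (what is proved, stated in full; the proofs are below) =====
def Claim_equal_myTrim : Prop := ∀ (onehot_pred_index : List Int) (threshold : Int), Dom_myTrim onehot_pred_index threshold → Pre_myTrim onehot_pred_index threshold → Spec_myTrim onehot_pred_index threshold (myTrim onehot_pred_index threshold)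

-- ===== LEMMAS AND PROOFS =====

-- reductions of one step of A's loop
theorem stepA_skip' (thr : Int) (o : List Int) (c k : Int) :
    stepA thr (o, c, c, k) c = (o, c, c, k) := by
  simp [stepA]

theorem stepA_inc (thr : Int) (o : List Int) (c k x : Int) (h : x ≠ c) :
    stepA thr (o, c, x, k) x =
      if k + 1 = thr then (o ++ [x], x, x, k + 1) else (o, c, x, k + 1) := by
  simp [stepA, h]

theorem stepA_new (thr : Int) (o : List Int) (c t k x : Int) (h : x ≠ t) :
    stepA thr (o, c, t, k) x =
      if (1 : Int) = thr then (o ++ [x], x, x, 1) else (o, c, x, 1) := by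
  simp [stepA, h]

theorem rleGo_spec (ys : List Int) : ∀ (v n : Int),
    rleGo v n ys = (v, n + ((ys.takeWhile (· == v)).length : Int)) :: rle (ys.dropWhile (· == v)) := by
  induction ys with
  | nil => intro v n; simp [rleGo, rle]
  | cons y ys ih =>
    intro v n
    by_cases h : y = v
    · subst h
      rw [List.takeWhile_cons_of_pos (by simp), List.dropWhile_cons_of_pos (by simp)]
      have e1 : rleGo y n (y :: ys) = rleGo y (n + 1) ys := by simp [rleGo]
      rw [e1, ih y (n + 1)]
      have : n + 1 + ((ys.takeWhile (· == y)).length : Int)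
           = n + (((y :: ys.takeWhile (· == y)).length : Nat) : Int) := by
        simp; ring
      rw [this]
    · rw [List.takeWhile_cons_of_neg (by simp [h]), List.dropWhile_cons_of_neg (by simp [h])]
      simp [rleGo, h, rle]

theorem foldA_continue (threshold : Int) (m : Nat) : ∀ (o : List Int) (c k : Int),
    List.foldl (stepA threshold) (o, c, c, k) (List.replicate m c) = (o, c, c, k) := by
  induction m with
  | zero => intro o c k; rfl
  | succ m ih =>
    intro o c k
    rw [List.replicate_succ, List.foldl_cons, stepA_skip']
    exact ih o c k

theorem foldB_skipGo (threshold : Int) (ys : List Int) : ∀ (n m : Int) (o : List Int) (c : Int),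
    List.foldl (stepB threshold) (o, c) (rleGo c n ys) =
    List.foldl (stepB threshold) (o, c) (rleGo c m ys) := by
  induction ys with
  | nil => intro n m o c; simp [rleGo, stepB]
  | cons y ys ih =>
    intro n m o c
    by_cases h : y = c
    · subst h
      have e1 : ∀ j : Int, rleGo y j (y :: ys) = rleGo y (j + 1) ys := fun j => by simp [rleGo]
      rw [e1, e1]
      exact ih (n + 1) (m + 1) o y
    · simp [rleGo, h, stepB]

theorem foldB_skipCons (threshold : Int) (rest : List Int) (o : List Int) (c : Int) :
    List.foldl (stepB threshold) (o, c) (rle (c :: rest)) =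
    List.foldl (stepB threshold) (o, c) (rle rest) := by
  cases rest with
  | nil => simp [rle, rleGo, stepB]
  | cons r rs =>
    by_cases h : r = c
    · subst h
      show List.foldl (stepB threshold) (o, r) (rleGo r 1 (r :: rs)) = _
      have e1 : rleGo r 1 (r :: rs) = rleGo r 2 rs := by simp [rleGo]
      rw [e1]
      show _ = List.foldl (stepB threshold) (o, r) (rleGo r 1 rs)
      exact foldB_skipGo threshold rs 2 1 o r
    · show List.foldl (stepB threshold) (o, c) (rleGo c 1 (r :: rs)) = _
      simp [rleGo, h, rle, stepB]

-- processing m further copies of x while counting up (x differs from current)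
theorem foldA_count (threshold : Int) (x : Int) (m : Nat) : ∀ (o : List Int) (c j : Int), x ≠ c →
    List.foldl (stepA threshold) (o, c, x, j) (List.replicate m x) =
      if j < threshold ∧ threshold ≤ j + (m : Int) then (o ++ [x], x, x, threshold)
      else (o, c, x, j + (m : Int)) := by
  induction m with
  | zero =>
    intro o c j hxc
    rw [List.replicate, List.foldl_nil, if_neg (by omega)]
    simp
  | succ m ih =>
    intro o c j hxc
    rw [List.replicate_succ, List.foldl_cons, stepA_inc threshold o c j x hxc]
    by_cases ht : j + 1 = threshold
    · rw [if_pos ht, ht, foldA_continue, if_pos (by constructor <;> omega)]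
    · rw [if_neg ht, ih o c (j + 1) hxc]
      by_cases hc : j + 1 < threshold ∧ threshold ≤ j + 1 + (m : Int)
      · rw [if_pos hc, if_pos (by push_cast; omega)]
      · rw [if_neg hc, if_neg (by push_cast; omega)]
        have : j + 1 + (m : Int) = j + ((m + 1 : Nat) : Int) := by push_cast; ring
        rw [this]

theorem takeWhile_eq_replicate (x : Int) (l : List Int) :
    l.takeWhile (· == x) = List.replicate (l.takeWhile (· == x)).length x := by
  rw [List.eq_replicate_iff]
  refine ⟨rfl, fun b hb => ?_⟩
  have := List.mem_takeWhile_imp hb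
  simpa using this

theorem head_dropWhile_ne (x : Int) (l : List Int) :
    ∀ y, (l.dropWhile (· == x)).head? = some y → y ≠ x := by
  induction l with
  | nil => intro y h; simp [List.dropWhile] at h
  | cons a l ih =>
    intro y h
    by_cases hax : a = x
    · exact ih y (by simpa [List.dropWhile, hax] using h)
    · rw [List.dropWhile_cons_of_neg (by simp [hax])] at h
      simp at h
      subst h
      exact hax

-- main loop correspondence: A's fold over the elements vs B's fold over the runs
theorem mainEq (threshold : Int) : ∀ (N : Nat) (xs : List Int), xs.length ≤ N →
    ∀ (o : List Int) (c t k : Int),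
    (∀ x, xs.head? = some x → x = t → t = c) →
    (threshold = 1 → c = t) →
    (List.foldl (stepA threshold) (o, c, t, k) xs).1 =
    (List.foldl (stepB threshold) (o, c) (rle xs)).1 := by
  intro N
  induction N with
  | zero =>
    intro xs hlen o c t k _ _
    have : xs = [] := List.eq_nil_of_length_eq_zero (Nat.le_zero.mp hlen)
    subst this; rfl
  | succ N ih =>
    intro xs hlen o c t k h1 h2
    cases xs with
    | nil => rfl
    | cons x rest =>
      have hlenr : rest.length ≤ N := Nat.lt_succ_iff.mp (by simpa using hlen)
      by_cases hxt : x = t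
      · -- continuation of the sentinel/current run: A 'continue's, B skips the run
        have htc : t = c := h1 x rfl hxt
        subst hxt; subst htc
        rw [List.foldl_cons, stepA_skip', foldB_skipCons]
        exact ih rest hlenr o x x k (fun y _ hyx => hyx ▸ rfl) (fun _ => rfl)
      · -- fresh run of value x
        set a := rest.takeWhile (· == x) with ha
        set rest' := rest.dropWhile (· == x) with hrest'
        have hsplit : rest = List.replicate a.length x ++ rest' := by
          conv_lhs => rw [← List.takeWhile_append_dropWhile (p := (· == x)) (l := rest)]
          rw [← ha, ← hrest', ← takeWhile_eq_replicate]
        have hlen' : rest'.length ≤ N := by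
          have h2' : rest'.length ≤ rest.length := by
            rw [hrest']; exact List.length_dropWhile_le _ _
          omega
        have hhead : ∀ y, rest'.head? = some y → y ≠ x := head_dropWhile_ne x rest
        have hrleB : rle (x :: rest) = (x, 1 + (a.length : Int)) :: rle rest' := by
          show rleGo x 1 rest = _
          rw [rleGo_spec, ← ha, ← hrest']
        rw [List.foldl_cons, stepA_new threshold o c t k x hxt, hrleB, List.foldl_cons]
        by_cases hthr1 : (1 : Int) = threshold
        · -- threshold = 1: both append x (x ≠ c since c = t here)
          have hxc : x ≠ c := fun h' => hxt (h'.trans (h2 hthr1.symm))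
          rw [if_pos hthr1, hsplit, List.foldl_append, foldA_continue]
          have hBc : stepB threshold (o, c) (x, 1 + (a.length : Int)) = (o ++ [x], x) := by
            simp only [stepB]; exact if_pos ⟨hxc, by omega, by omega⟩
          rw [hBc]
          exact ih rest' hlen' (o ++ [x]) x x 1
            (fun y hy hyx => absurd hyx (hhead y hy)) (fun _ => rfl)
        · rw [if_neg hthr1]
          by_cases hxc : x = c
          · -- run equal to `current`: A's count sticks at 1, B skips it
            subst hxc
            rw [hsplit, List.foldl_append, foldA_continue]
            have hBc : stepB threshold (o, x) (x, 1 + (a.length : Int)) = (o, x) := by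
              simp [stepB]
            rw [hBc]
            exact ih rest' hlen' o x x 1
              (fun y _ _ => rfl) (fun h => absurd h.symm hthr1)
          · rw [hsplit, List.foldl_append, foldA_count threshold x a.length o c 1 hxc]
            by_cases hcond : (1 : Int) < threshold ∧ threshold ≤ 1 + (a.length : Int)
            · rw [if_pos (by omega)]
              have hBc : stepB threshold (o, c) (x, 1 + (a.length : Int)) = (o ++ [x], x) := by
                simp only [stepB]; exact if_pos ⟨hxc, by omega, by omega⟩
              rw [hBc]
              exact ih rest' hlen' (o ++ [x]) x x threshold
                (fun y hy hyx => absurd hyx (hhead y hy)) (fun h => absurd h.symm hthr1)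
            · rw [if_neg (by omega)]
              have hBc : stepB threshold (o, c) (x, 1 + (a.length : Int)) = (o, c) := by
                simp only [stepB]
                exact if_neg (by intro hh; exact hcond ⟨by omega, hh.2.2⟩)
              rw [hBc]
              exact ih rest' hlen' o c x (1 + (a.length : Int))
                (fun y hy hyx => absurd hyx (hhead y hy)) (fun h => absurd h.symm hthr1)

-- ===== VERDICT (by name: the statement is the Claim_ definition above) =====
theorem myTrim_spec : Claim_equal_myTrim := by
  intro xs threshold _ _
  unfold Spec_myTrim myTrim myTrim_alt
  have h := mainEq threshold xs.length xs le_rfl [] 7 7 0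
    (fun _ _ hx => hx ▸ rfl) (fun _ => rfl)
  simp only at h ⊢
  rw [h]
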